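-- pv_equiv track=rewrite | github.com/Srijani-coder/blog_application | app.py | wrap_lists
-- ===== SOURCE A (Python) =====
-- def wrap_lists(html):
--     lines = html.split("\n")
--     result = []
--     in_list = False
--
--     for line in lines:
--         if "<li>" in line:
--             if not in_list:
--                 result.append("<ul>")
--                 in_list = True
--             result.append(line)
--         else:
--             if in_list:
--                 result.append("</ul>")
--                 in_list = False
--             result.append(line)
--
--     if in_list:
--         result.append("</ul>")
--
--     return "\n".join(result)
-- ===== SOURCE B (Python) =====
-- def wrap_lists(html):
--     # group-then-emit: find each maximal run of lines with the same "<li>" status,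
--     # emit the run (bracketed by <ul>/</ul> when it is a run of list items)
--     lines = html.split("\n")
--     out = []
--     n = len(lines)
--     i = 0
--     while i < n:
--         is_li = "<li>" in lines[i]
--         j = i
--         while j < n and ("<li>" in lines[j]) == is_li:
--             j += 1
--         if is_li:
--             out.append("<ul>")
--             out.extend(lines[i:j])
--             out.append("</ul>")
--         else:
--             out.extend(lines[i:j])
--         i = j
--     return "\n".join(out)
-- ===== Notes on version B (the rewrite author's own statement) =====
-- stated objective: alternative
-- what changed: Replaces A's in_list flag with a trailing flush by a group-then-emit pass: each maximal run of consecutive lines with the same "<li>" status is found with an inner scan and emitted at once, bracketed with <ul>/</ul> when it is a run of list items.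
import Mathlib
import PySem

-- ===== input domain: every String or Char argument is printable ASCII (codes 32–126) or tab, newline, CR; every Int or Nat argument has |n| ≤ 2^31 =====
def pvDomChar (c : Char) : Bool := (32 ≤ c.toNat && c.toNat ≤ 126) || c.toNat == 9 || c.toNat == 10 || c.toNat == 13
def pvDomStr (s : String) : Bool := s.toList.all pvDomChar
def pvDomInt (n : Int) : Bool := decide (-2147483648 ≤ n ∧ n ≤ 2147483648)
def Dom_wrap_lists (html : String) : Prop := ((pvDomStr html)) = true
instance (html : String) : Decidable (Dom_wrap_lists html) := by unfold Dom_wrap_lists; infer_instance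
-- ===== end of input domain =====

-- B replaces A's in_list flag + trailing flush by a group-then-emit pass over maximal
-- runs of consecutive "<li>" lines (objective: idiomatic/alternative decomposition).


-- ===== PORT A =====
-- loop body of A's for-loop: state = (result, in_list)
def wrapStepA (st : List String × Bool) (line : String) : List String × Bool :=
  if PySem.Str.isIn "<li>" line then
    let result := if !st.2 then st.1 ++ ["<ul>"] else st.1
    (result ++ [line], true)
  else
    let result := if st.2 then st.1 ++ ["</ul>"] else st.1
    (result ++ [line], false)

def wrap_lists (html : String) : String :=
  let lines := (PySem.Str.split? html "\n").getD []   -- sep "\n" ≠ "" so split? is always some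
  let st := lines.foldl wrapStepA ([], false)
  let result := if st.2 then st.1 ++ ["</ul>"] else st.1
  PySem.Str.join "\n" result

-- ===== PORT B =====
-- Source B's inner while loop: split off the maximal run of lines whose "<li>"-status equals k
def wrapRun (k : Bool) : List String → List String × List String
  | [] => ([], [])
  | l :: ls =>
    if PySem.Str.isIn "<li>" l == k then
      let p := wrapRun k ls
      (l :: p.1, p.2)
    else ([], l :: ls)

theorem wrapRun_snd_len (k : Bool) (ls : List String) : (wrapRun k ls).2.length ≤ ls.length := by
  induction ls with
  | nil => simp [wrapRun]
  | cons l ls ih =>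
    simp only [wrapRun]
    split
    · simpa using Nat.le_succ_of_le ih
    · simp

-- Source B's outer while loop: emit each run, bracketed with <ul>/</ul> when it is a <li>-run
def wrapGo : List String → List String
  | [] => []
  | l :: ls =>
    let k := PySem.Str.isIn "<li>" l
    let p := wrapRun k ls
    (if k then "<ul>" :: l :: (p.1 ++ ["</ul>"]) else l :: p.1) ++ wrapGo p.2
termination_by ls => ls.length
decreasing_by
  have := wrapRun_snd_len (PySem.Str.isIn "<li>" l) ls
  simpa using Nat.lt_succ_of_le this

def wrap_lists_alt (html : String) : String :=
  let lines := (PySem.Str.split? html "\n").getD []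
  PySem.Str.join "\n" (wrapGo lines)

-- ===== PRECONDITION & SPEC =====
def Spec_wrap_lists (html : String) (out : String) : Prop := out = wrap_lists_alt html
instance (html : String) (out : String) : Decidable (Spec_wrap_lists html out) := by unfold Spec_wrap_lists; infer_instance

-- ===== CLAIM (what is proved, stated in full; the proofs are below) =====
def Claim_equal_wrap_lists : Prop := ∀ (html : String), Dom_wrap_lists html → Spec_wrap_lists html (wrap_lists html)

-- ===== LEMMAS AND PROOFS =====
-- A's loop + trailing flush, written as a recursion (proof-only characterisation of A)
def wrapRecA : List String → Bool → List String
  | [], k => if k then ["</ul>"] else []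
  | l :: ls, k =>
    if PySem.Str.isIn "<li>" l then
      (if k then [l] else ["<ul>", l]) ++ wrapRecA ls true
    else
      (if k then ["</ul>", l] else [l]) ++ wrapRecA ls false

theorem foldl_wrapStepA (ls : List String) : ∀ (acc : List String) (k : Bool),
    (let st := ls.foldl wrapStepA (acc, k);
     if st.2 then st.1 ++ ["</ul>"] else st.1) = acc ++ wrapRecA ls k := by
  induction ls with
  | nil => intro acc k; cases k <;> simp [wrapRecA]
  | cons l ls ih =>
    intro acc k
    simp only [List.foldl_cons, wrapStepA, wrapRecA]
    by_cases h : PySem.Chars.isIn ['<', 'l', 'i', '>'] l.toList = true <;> cases k <;>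
      simp [h, ih, List.append_assoc]

theorem wrapRecA_eq_run (ls : List String) : ∀ (k : Bool),
    wrapRecA ls k = (wrapRun k ls).1 ++
      (if k then "</ul>" :: wrapGo (wrapRun k ls).2 else wrapGo (wrapRun k ls).2) := by
  induction ls with
  | nil => intro k; cases k <;> simp [wrapRecA, wrapRun, wrapGo]
  | cons l ls ih =>
    intro k
    by_cases h : PySem.Chars.isIn ['<', 'l', 'i', '>'] l.toList = true <;> cases k <;>
      simp [wrapRecA, wrapRun, wrapGo, h, ih, List.append_assoc]

theorem wrapRecA_false (ls : List String) : wrapRecA ls false = wrapGo ls := by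
  cases ls with
  | nil => simp [wrapRecA, wrapGo]
  | cons l ls =>
    rw [wrapRecA_eq_run]
    by_cases h : PySem.Chars.isIn ['<', 'l', 'i', '>'] l.toList = true <;>
      simp [wrapRun, wrapGo, h, List.append_assoc]

-- ===== VERDICT (by name: the statement is the Claim_ definition above) =====
theorem wrap_joins_eq (ls : List String) :
    PySem.Str.join "\n"
      (let st := ls.foldl wrapStepA ([], false);
       if st.2 then st.1 ++ ["</ul>"] else st.1) =
    PySem.Str.join "\n" (wrapGo ls) := by
  rw [foldl_wrapStepA ls [] false, wrapRecA_false]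
  simp

theorem wrap_lists_spec : Claim_equal_wrap_lists := by
  intro html _
  exact wrap_joins_eq ((PySem.Str.split? html "\n").getD [])
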